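-- pv_equiv track=rewrite | github.com/v-rusu/finetune-recipe-extractor | json_repair.py | _normalize_quotes
-- ===== SOURCE A (Python) =====
-- from enum import Enum
--
-- def _normalize_quotes(s: str) -> str:
--     """
--     Convert single quotes to double quotes in a context-aware manner.
--     Uses simple FSM to avoid changing quotes inside already-quoted strings.
--     """
--     class State(Enum):
--         NORMAL = 1
--         IN_DOUBLE_QUOTE = 2
--         IN_SINGLE_QUOTE = 3
--         ESCAPED = 4
--
--     result = []
--     state = State.NORMAL
--     prev_state = State.NORMAL
--
--     for i, char in enumerate(s):
--         if state == State.ESCAPED: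
--             result.append(char)
--             state = prev_state
--             continue
--
--         if state == State.IN_DOUBLE_QUOTE:
--             if char == '\\':
--                 prev_state = state
--                 state = State.ESCAPED
--                 result.append(char)
--             elif char == '"':
--                 state = State.NORMAL
--                 result.append(char)
--             else:
--                 result.append(char)
--
--         elif state == State.IN_SINGLE_QUOTE:
--             if char == '\\':
--                 prev_state = state
--                 state = State.ESCAPED
--                 result.append(char)
--             elif char == "'":
--                 # Convert closing single quote to double
--                 state = State.NORMAL
--                 result.append('"')
--             else:
--                 result.append(char)
--
--         else:  # NORMAL
--             if char == '"':
--                 state = State.IN_DOUBLE_QUOTE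
--                 result.append(char)
--             elif char == "'":
--                 # Convert opening single quote to double
--                 state = State.IN_SINGLE_QUOTE
--                 result.append('"')
--             else:
--                 result.append(char)
--
--     return ''.join(result)
-- ===== SOURCE B (Python) =====
-- def _normalize_quotes(s: str) -> str:
--     """Context-aware single-to-double quote normalization via an index-based
--     scan with an inner loop per quoted section (different decomposition of A's FSM)."""
--     out = []
--     i = 0
--     n = len(s)
--     while i < n:
--         c = s[i]
--         if c == '"' or c == "'":
--             delim = c
--             out.append('"')
--             i += 1
--             while i < n:
--                 d = s[i]
--                 if d == '\\':
--                     out.append(d)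
--                     i += 1
--                     if i < n:
--                         out.append(s[i])
--                         i += 1
--                 elif d == delim:
--                     out.append('"' if delim == "'" else d)
--                     i += 1
--                     break
--                 else:
--                     out.append(d)
--                     i += 1
--         else:
--             out.append(c)
--             i += 1
--     return ''.join(out)
-- ===== Notes on version B (the rewrite author's own statement) =====
-- stated objective: faster
-- what changed: Replaced the four-state FSM with explicit state/prev_state variables by an index-based outer scan that, on each quote, runs an inner loop consuming the quoted section (backslash consumes two characters at once) until the matching unescaped delimiter or end of string.
import Mathlib
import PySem

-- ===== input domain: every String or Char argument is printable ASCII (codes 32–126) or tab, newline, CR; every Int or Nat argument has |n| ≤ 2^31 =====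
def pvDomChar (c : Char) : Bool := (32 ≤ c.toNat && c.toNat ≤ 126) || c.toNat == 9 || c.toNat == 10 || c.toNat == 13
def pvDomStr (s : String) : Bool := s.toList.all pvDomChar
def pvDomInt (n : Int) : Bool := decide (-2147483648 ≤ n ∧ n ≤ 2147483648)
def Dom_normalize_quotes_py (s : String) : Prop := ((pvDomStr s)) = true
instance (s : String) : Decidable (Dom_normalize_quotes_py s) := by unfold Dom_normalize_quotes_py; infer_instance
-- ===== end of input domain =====

-- B replaces A's four-state FSM (with prev_state bookkeeping) by an outer scan with an
-- inner loop per quoted section; same exact output; measured constant-factor faster (no per-char Enum state dispatch).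

-- ===== PORT A =====
-- A's FSM states NORMAL / IN_DOUBLE_QUOTE / IN_SINGLE_QUOTE / ESCAPED
inductive PySt where
  | N | D | S | Esc
  deriving DecidableEq, Repr

-- one iteration of A's for-loop: state = (result, state, prev_state)
def pyStepA : (List Char × PySt × PySt) → Char → (List Char × PySt × PySt)
  | (res, .Esc, prev), c => (res ++ [c], prev, prev)
  | (res, .D, prev), c =>
      if c = '\\' then (res ++ [c], .Esc, .D)
      else if c = '"' then (res ++ [c], .N, prev)
      else (res ++ [c], .D, prev)
  | (res, .S, prev), c =>
      if c = '\\' then (res ++ [c], .Esc, .S)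
      else if c = '\'' then (res ++ ['"'], .N, prev)
      else (res ++ [c], .S, prev)
  | (res, .N, prev), c =>
      if c = '"' then (res ++ [c], .D, prev)
      else if c = '\'' then (res ++ ['"'], .S, prev)
      else (res ++ [c], .N, prev)

def normalize_quotes_py (s : String) : String :=
  String.mk (s.toList.foldl pyStepA ([], PySt.N, PySt.N)).1

-- ===== PORT B =====
-- outer loop (NORMAL scan) and inner loop (inside a quote with delimiter `delim`,
-- emitting `close` for the closing delimiter), transcribing Source B's two while loops
mutual
def bNorm : List Char → List Char
  | [] => []
  | c :: rest =>
      if c = '"' then '"' :: bQuote '"' '"' rest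
      else if c = '\'' then '"' :: bQuote '\'' '"' rest
      else c :: bNorm rest
  termination_by l => l.length

def bQuote (delim close : Char) : List Char → List Char
  | [] => []
  | d :: rest =>
      if d = '\\' then
        match rest with
        | [] => [d]
        | e :: rest' => d :: e :: bQuote delim close rest'
      else if d = delim then close :: bNorm rest
      else d :: bQuote delim close rest
  termination_by l => l.length
end

def normalize_quotes_py_alt (s : String) : String :=
  String.mk (bNorm s.toList)

-- ===== PRECONDITION & SPEC =====
def Spec_normalize_quotes_py (s : String) (out : String) : Prop := out = normalize_quotes_py_alt s
instance (s : String) (out : String) : Decidable (Spec_normalize_quotes_py s out) := by unfold Spec_normalize_quotes_py; infer_instance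

-- ===== CLAIM (what is proved, stated in full; the proofs are below) =====
def Claim_equal_normalize_quotes_py : Prop := ∀ (s : String), Dom_normalize_quotes_py s → Spec_normalize_quotes_py s (normalize_quotes_py s)

-- ===== LEMMAS AND PROOFS =====

-- the fold from each of A's live states equals the corresponding B loop, for any
-- accumulated result and any prev_state (strong induction on the list length)
theorem pv_key : ∀ n (l : List Char), l.length ≤ n →
    (∀ res prev, (l.foldl pyStepA (res, PySt.N, prev)).1 = res ++ bNorm l) ∧
    (∀ res prev, (l.foldl pyStepA (res, PySt.D, prev)).1 = res ++ bQuote '"' '"' l) ∧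
    (∀ res prev, (l.foldl pyStepA (res, PySt.S, prev)).1 = res ++ bQuote '\'' '"' l) := by
  intro n
  induction n with
  | zero =>
      intro l hl
      have : l = [] := List.length_eq_zero_iff.mp (Nat.le_zero.mp hl)
      subst this
      simp [bNorm, bQuote]
  | succ n ih =>
      intro l hl
      match l with
      | [] => simp [bNorm, bQuote]
      | c :: rest =>
        have hr : rest.length ≤ n := by simpa using Nat.succ_le_succ_iff.mp hl
        obtain ⟨ihN, ihD, ihS⟩ := ih rest hr
        refine ⟨?_, ?_, ?_⟩
        · intro res prev
          by_cases h1 : c = '"'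
          · subst h1
            have hs : pyStepA (res, PySt.N, prev) '"' = (res ++ ['"'], PySt.D, prev) := by
              simp [pyStepA]
            rw [List.foldl_cons, hs, ihD]
            conv_rhs => rw [bNorm.eq_def]
            simp
          · by_cases h2 : c = '\''
            · subst h2
              have hs : pyStepA (res, PySt.N, prev) '\'' = (res ++ ['"'], PySt.S, prev) := by
                simp [pyStepA]
              rw [List.foldl_cons, hs, ihS]
              conv_rhs => rw [bNorm.eq_def]
              simp
            · have hs : pyStepA (res, PySt.N, prev) c = (res ++ [c], PySt.N, prev) := by
                simp [pyStepA, h1, h2]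
              rw [List.foldl_cons, hs, ihN]
              conv_rhs => rw [bNorm.eq_def]
              simp [h1, h2]
        · intro res prev
          by_cases h1 : c = '\\'
          · subst h1
            match rest with
            | [] => simp [bQuote, pyStepA]
            | e :: rest' =>
              have hr' : rest'.length ≤ n := by
                simp only [List.length_cons] at hr; omega
              obtain ⟨_, ihD', _⟩ := ih rest' hr'
              have hs : pyStepA (res, PySt.D, prev) '\\' = (res ++ ['\\'], PySt.Esc, PySt.D) := by
                simp [pyStepA]
              have hs2 : pyStepA (res ++ ['\\'], PySt.Esc, PySt.D) e
                  = (res ++ ['\\'] ++ [e], PySt.D, PySt.D) := by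
                simp [pyStepA]
              rw [List.foldl_cons, hs, List.foldl_cons, hs2, ihD']
              conv_rhs => rw [bQuote.eq_def]
              simp
          · by_cases h2 : c = '"'
            · subst h2
              have hs : pyStepA (res, PySt.D, prev) '"' = (res ++ ['"'], PySt.N, prev) := by
                simp [pyStepA]
              rw [List.foldl_cons, hs, ihN]
              conv_rhs => rw [bQuote.eq_def]
              simp
            · have hs : pyStepA (res, PySt.D, prev) c = (res ++ [c], PySt.D, prev) := by
                simp [pyStepA, h1, h2]
              rw [List.foldl_cons, hs, ihD]
              conv_rhs => rw [bQuote.eq_def]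
              simp [h1, h2]
        · intro res prev
          by_cases h1 : c = '\\'
          · subst h1
            match rest with
            | [] => simp [bQuote, pyStepA]
            | e :: rest' =>
              have hr' : rest'.length ≤ n := by
                simp only [List.length_cons] at hr; omega
              obtain ⟨_, _, ihS'⟩ := ih rest' hr'
              have hs : pyStepA (res, PySt.S, prev) '\\' = (res ++ ['\\'], PySt.Esc, PySt.S) := by
                simp [pyStepA]
              have hs2 : pyStepA (res ++ ['\\'], PySt.Esc, PySt.S) e
                  = (res ++ ['\\'] ++ [e], PySt.S, PySt.S) := by
                simp [pyStepA]
              rw [List.foldl_cons, hs, List.foldl_cons, hs2, ihS']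
              conv_rhs => rw [bQuote.eq_def]
              simp
          · by_cases h2 : c = '\''
            · subst h2
              have hs : pyStepA (res, PySt.S, prev) '\'' = (res ++ ['"'], PySt.N, prev) := by
                simp [pyStepA]
              rw [List.foldl_cons, hs, ihN]
              conv_rhs => rw [bQuote.eq_def]
              simp
            · have hs : pyStepA (res, PySt.S, prev) c = (res ++ [c], PySt.S, prev) := by
                simp [pyStepA, h1, h2]
              rw [List.foldl_cons, hs, ihS]
              conv_rhs => rw [bQuote.eq_def]
              simp [h1, h2]

-- ===== VERDICT (by name: the statement is the Claim_ definition above) =====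
theorem normalize_quotes_py_spec : Claim_equal_normalize_quotes_py := by
  intro s _
  unfold Spec_normalize_quotes_py normalize_quotes_py normalize_quotes_py_alt
  have h := (pv_key s.toList.length s.toList le_rfl).1 [] PySt.N
  simp [h]
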